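-- pv_equiv track=rewrite | github.com/ViniDias1/UFS-code-Exercises | Projetos-Arq-de-Computadores/poxim2-ENVIADO.py | completaZeroBin
-- ===== SOURCE A (Python) =====
-- def completaZeroBin(b):
--     for i in range(32):
--         bms = b[0]
--         if len(b) < 32:
--             b = bms + b
--         else:
--             break
--     return b
-- ===== SOURCE B (Python) =====
-- def completaZeroBin(b):
--     return (32 - len(b)) * b[0] + b
-- ===== Notes on version B (the rewrite author's own statement) =====
-- stated objective: simpler
-- what changed: Replaces the 32-iteration prepend loop with a single closed-form string expression (32-len(b))*b[0]+b; non-positive repetition yields the empty string so long inputs pass through unchanged.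
import Mathlib
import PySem

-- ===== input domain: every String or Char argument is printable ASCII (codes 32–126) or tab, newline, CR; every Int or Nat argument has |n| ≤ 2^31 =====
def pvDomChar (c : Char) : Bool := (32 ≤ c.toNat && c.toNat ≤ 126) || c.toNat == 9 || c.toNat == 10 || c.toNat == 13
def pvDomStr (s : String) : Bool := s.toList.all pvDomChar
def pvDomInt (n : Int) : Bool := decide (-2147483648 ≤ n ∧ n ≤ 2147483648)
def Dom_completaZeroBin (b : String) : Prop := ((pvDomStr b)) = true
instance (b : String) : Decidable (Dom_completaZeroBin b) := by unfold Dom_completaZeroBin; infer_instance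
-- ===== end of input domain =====

-- B replaces A's 32-iteration one-character-at-a-time prepend loop by the closed form
-- (32 - len b) * b[0] + b; equivalence of RETURN values is proved for nonempty b (empty b raises in both).

-- ===== PORT A =====
-- the for-loop over range(32) with the break, threading b as the state;
-- `b[0]` on the empty string is Python's IndexError (excluded by Pre_; the port returns the state unchanged there)
def completaZeroBinLoop : Nat → List Char → List Char
  | 0, l => l
  | n + 1, l =>
    match l with
    | [] => []                                  -- b[0] would raise IndexError (outside Pre_)
    | bms :: _ => if l.length < 32 then completaZeroBinLoop n (bms :: l) else l

def completaZeroBin (b : String) : String :=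
  String.ofList (completaZeroBinLoop 32 b.toList)

-- ===== PORT B =====
def completaZeroBin_alt (b : String) : String :=
  match b.toList with
  | [] => ""                                    -- b[0] would raise IndexError (outside Pre_)
  | c :: _ => String.ofList (List.replicate (32 - b.toList.length) c ++ b.toList)

-- ===== PRECONDITION & SPEC =====
-- Pre_ excludes only the empty string, on which both Pythons raise IndexError at b[0].
def Pre_completaZeroBin (b : String) : Prop := b ≠ ""
instance (b : String) : Decidable (Pre_completaZeroBin b) := by unfold Pre_completaZeroBin; infer_instance
def pvWitness_completaZeroBin : String := "101"

def Spec_completaZeroBin (b : String) (out : String) : Prop := out = completaZeroBin_alt b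
instance (b : String) (out : String) : Decidable (Spec_completaZeroBin b out) := by unfold Spec_completaZeroBin; infer_instance

-- ===== CLAIM (what is proved, stated in full; the proofs are below) =====
def Claim_equal_completaZeroBin : Prop := ∀ (b : String), Dom_completaZeroBin b → Pre_completaZeroBin b → Spec_completaZeroBin b (completaZeroBin b)

-- ===== LEMMAS AND PROOFS =====

-- loop invariant: starting from a nonempty list headed by c, n iterations prepend
-- min n (32 - length) copies of c
theorem completaZeroBinLoop_eq (n : Nat) (c : Char) (rest : List Char) :
    completaZeroBinLoop n (c :: rest) =
      List.replicate (min n (32 - (c :: rest).length)) c ++ (c :: rest) := by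
  induction n generalizing rest with
  | zero => simp [completaZeroBinLoop]
  | succ n ih =>
    by_cases h : (c :: rest).length < 32
    · have h2 : min (n + 1) (32 - (c :: rest).length) = min n (32 - (c :: c :: rest).length) + 1 := by
        simp only [List.length_cons] at h ⊢; omega
      simp only [completaZeroBinLoop, if_pos h, ih, h2, List.replicate_succ]
      simp only [List.length_cons, List.cons_append]
      rw [show c :: c :: rest = [c] ++ (c :: rest) from rfl, ← List.append_assoc,
        ← List.replicate_succ']
      simp [List.replicate_succ]
    · have h2 : 32 - (c :: rest).length = 0 := by omega
      simp only [List.length_cons] at h h2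
      simp [completaZeroBinLoop, h, h2]

-- ===== VERDICT (by name: the statement is the Claim_ definition above) =====
theorem completaZeroBin_spec : Claim_equal_completaZeroBin := by
  intro b _ hpre
  have hne : b.toList ≠ [] := by
    intro h
    exact hpre (by have := congrArg String.ofList h; simpa using this)
  unfold Spec_completaZeroBin completaZeroBin completaZeroBin_alt
  cases hl : b.toList with
  | nil => exact absurd hl hne
  | cons c rest =>
    rw [completaZeroBinLoop_eq]
    have : min 32 (32 - (c :: rest).length) = 32 - (c :: rest).length := by
      simp only [List.length_cons]; omega
    rw [this]
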